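-- pv_equiv track=rewrite | github.com/9998546789/firstpart | python_algorithms/lesson3/Task3.py | get_max_min_value
-- ===== SOURCE A (Python) =====
-- def get_max_min_value(current_array):
--     max_value, min_value = 0, 0
--     for x in current_array:
--         if x > max_value:
--             max_value = x
--         if x < min_value:
--             min_value = x
--     return (max_value, min_value)
-- ===== SOURCE B (Python) =====
-- def get_max_min_value(current_array):
--     items = [0, *current_array]
--     return (max(items), min(items))
-- ===== Notes on version B (the rewrite author's own statement) =====
-- stated objective: simpler
-- what changed: Replaces the single combined accumulator loop with one materialized list (0 prepended to capture the 0 start values) reduced twice by the builtins max and min.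
import Mathlib
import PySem

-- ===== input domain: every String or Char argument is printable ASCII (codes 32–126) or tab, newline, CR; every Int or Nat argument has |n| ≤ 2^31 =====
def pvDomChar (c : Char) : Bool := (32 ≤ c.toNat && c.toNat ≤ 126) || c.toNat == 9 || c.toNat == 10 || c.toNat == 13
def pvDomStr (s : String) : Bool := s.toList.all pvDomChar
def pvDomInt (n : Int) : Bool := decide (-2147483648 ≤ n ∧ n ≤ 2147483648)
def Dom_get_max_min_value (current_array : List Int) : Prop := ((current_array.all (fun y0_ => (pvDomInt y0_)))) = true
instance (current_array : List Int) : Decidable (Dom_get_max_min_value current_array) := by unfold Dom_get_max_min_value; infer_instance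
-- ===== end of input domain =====

-- B is simpler: it prepends 0 to the array and takes the builtin max and min, instead of A's combined accumulator loop.


-- ===== PORT A =====
-- A: one loop, pair accumulator starting at (0, 0).
def get_max_min_value (current_array : List Int) : Int × Int :=
  current_array.foldl
    (fun st x =>
      let mx := if x > st.1 then x else st.1
      let mn := if x < st.2 then x else st.2
      (mx, mn))
    (0, 0)

-- ===== PORT B =====
-- B: materialize [0, *arr], then two builtin reductions max(items), min(items).
def get_max_min_value_alt (current_array : List Int) : Int × Int :=
  let items : List Int := 0 :: current_array
  (((PySem.List.max? items (fun y => y)).getD 0),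
   ((PySem.List.min? items (fun y => y)).getD 0))

-- ===== PRECONDITION & SPEC =====
def Spec_get_max_min_value (current_array : List Int) (out : Int × Int) : Prop := out = get_max_min_value_alt current_array
instance (current_array : List Int) (out : Int × Int) : Decidable (Spec_get_max_min_value current_array out) := by unfold Spec_get_max_min_value; infer_instance

-- ===== CLAIM (what is proved, stated in full; the proofs are below) =====
def Claim_equal_get_max_min_value : Prop := ∀ (current_array : List Int), Dom_get_max_min_value current_array → Spec_get_max_min_value current_array (get_max_min_value current_array)

-- ===== LEMMAS AND PROOFS =====
lemma foldA_eq (l : List Int) (a b : Int) :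
    l.foldl (fun (st : Int × Int) x =>
      let mx := if x > st.1 then x else st.1
      let mn := if x < st.2 then x else st.2
      (mx, mn)) (a, b) = (l.foldl max a, l.foldl min b) := by
  induction l generalizing a b with
  | nil => simp
  | cons x t ih =>
    simp only [List.foldl]
    rw [ih]
    have h1 : (if x > a then x else a) = max a x := by omega
    have h2 : (if x < b then x else b) = min b x := by omega
    rw [h1, h2]

-- ===== VERDICT (by name: the statement is the Claim_ definition above) =====
theorem get_max_min_value_spec : Claim_equal_get_max_min_value := by
  intro current_array _
  unfold Spec_get_max_min_value get_max_min_value get_max_min_value_alt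
  simp only []
  rw [foldA_eq, PySem.List.max?_id_cons, PySem.List.min?_id_cons]
  rfl
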